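-- pv_equiv track=rewrite | github.com/anilk23m/Working_Folder | python_projects/Python_Coding_Round/Remove_chars_repeated_morethanonce.py | remove_repeated_characters
-- ===== SOURCE A (Python) =====
-- def remove_repeated_characters(s):
--     chars = list(s)
--     count = {}
--     for i in s:
--         count[i.lower()] = count.get(i.lower(),0) + 1
--
--     result = []
--     for ch in chars:
--         if count[ch.lower()] == 1:
--             result.append(ch)
--     return "".join(result)
-- ===== SOURCE B (Python) =====
-- def remove_repeated_characters(s):
--     low = sorted(s.lower())
--     dup = set()
--     for a, b in zip(low, low[1:]):
--         if a == b:
--             dup.add(a)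
--     return "".join(ch for ch in s if ch.lower() not in dup)
-- ===== Notes on version B (the rewrite author's own statement) =====
-- stated objective: alternative
-- what changed: B replaces A's frequency-dict counting pass by sort-then-scan: it sorts the lowered string, collects the set of characters that appear in an adjacent equal pair (the duplicated ones), and keeps the characters of s whose lowercase form is not in that set.
import Mathlib
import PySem

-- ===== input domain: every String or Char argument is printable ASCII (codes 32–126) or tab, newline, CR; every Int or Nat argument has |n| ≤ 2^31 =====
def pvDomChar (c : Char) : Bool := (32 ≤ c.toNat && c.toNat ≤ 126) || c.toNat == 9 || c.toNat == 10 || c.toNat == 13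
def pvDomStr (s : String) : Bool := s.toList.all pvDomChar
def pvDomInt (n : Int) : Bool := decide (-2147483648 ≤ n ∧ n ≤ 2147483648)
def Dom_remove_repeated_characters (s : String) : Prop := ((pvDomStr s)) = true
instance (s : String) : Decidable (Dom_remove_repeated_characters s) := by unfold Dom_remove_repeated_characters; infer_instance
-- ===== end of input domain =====

-- B replaces A's dict-counting pass by sort-then-scan: sort the lowered string and collect the
-- characters occurring in an adjacent equal pair (the duplicated ones), then filter s by that set.

-- ===== PORT A =====
-- count[ch.lower()] cannot raise (every key was inserted by the first loop), so getD is exact here.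
def remove_repeated_characters (s : String) : String :=
  let chars := s.toList
  let count : PySem.Dict Char Int :=
    s.toList.foldl (fun d i => d.insert (PySem.Chars.lowerChar i) (d.getD (PySem.Chars.lowerChar i) 0 + 1)) PySem.Dict.empty
  let result : List Char :=
    chars.foldl (fun acc ch => if count.getD (PySem.Chars.lowerChar ch) 0 == (1 : Int) then acc ++ [ch] else acc) []
  String.mk result

-- ===== PORT B =====
def remove_repeated_characters_alt (s : String) : String :=
  let low := PySem.List.sorted (PySem.Str.lower s).toList (fun x => x) false
  let dup : PySem.Set Char :=
    (low.zip (PySem.List.slice low (some 1) none)).foldl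
      (fun st p => if p.1 == p.2 then PySem.Set.add st p.1 else st) PySem.Set.empty
  String.mk (s.toList.filter (fun ch => !(dup.contains (PySem.Chars.lowerChar ch))))

-- ===== PRECONDITION & SPEC =====
def Spec_remove_repeated_characters (s : String) (out : String) : Prop := out = remove_repeated_characters_alt s
instance (s : String) (out : String) : Decidable (Spec_remove_repeated_characters s out) := by unfold Spec_remove_repeated_characters; infer_instance

-- ===== CLAIM (what is proved, stated in full; the proofs are below) =====
def Claim_equal_remove_repeated_characters : Prop := ∀ (s : String), Dom_remove_repeated_characters s → Spec_remove_repeated_characters s (remove_repeated_characters s)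

-- ===== LEMMAS AND PROOFS =====

-- membership in the fold-built duplicate set = some adjacent equal pair carries the character
theorem mem_dup_fold (c : Char) :
    ∀ (ps : List (Char × Char)) (s0 : PySem.Set Char),
      (c ∈ ps.foldl (fun st p => if p.1 == p.2 then PySem.Set.add st p.1 else st) s0)
        ↔ c ∈ s0 ∨ (c, c) ∈ ps := by
  intro ps
  induction ps with
  | nil => simp
  | cons p t ih =>
    intro s0
    obtain ⟨a, b⟩ := p
    rw [List.foldl_cons, ih]
    by_cases hab : a = b
    · subst hab
      simp only [beq_self_eq_true, if_true, PySem.Set.mem_add, List.mem_cons, Prod.mk.injEq]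
      tauto
    · have hb : (a == b) = false := beq_eq_false_iff_ne.mpr hab
      simp only [hb, List.mem_cons, Prod.mk.injEq]
      constructor
      · rintro (h1 | h2)
        · exact Or.inl h1
        · exact Or.inr (Or.inr h2)
      · rintro (h1 | ⟨rfl, rfl⟩ | h3)
        · exact Or.inl h1
        · exact absurd rfl hab
        · exact Or.inr h3

-- in a (≤)-sorted list, a character sits in an adjacent equal pair iff it occurs at least twice
theorem mem_zip_tail_iff_two_le_count (c : Char) :
    ∀ (l : List Char), l.Pairwise (· ≤ ·) → ((c, c) ∈ l.zip l.tail ↔ 2 ≤ l.count c) := by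
  intro l
  induction l with
  | nil => simp
  | cons a t ih =>
    intro hp
    cases t with
    | nil =>
      simp only [List.tail_cons, List.zip_nil_right, List.count_cons, List.count_nil]
      constructor
      · intro h; simp at h
      · intro h; split at h <;> omega
    | cons b u =>
      have hpt : (b :: u).Pairwise (· ≤ ·) := hp.of_cons
      have hab : a ≤ b := (List.pairwise_cons.mp hp).1 b (by simp)
      have ihh := ih hpt
      simp only [List.tail_cons] at ihh
      simp only [List.tail_cons, List.zip_cons_cons, List.mem_cons, Prod.mk.injEq]
      rw [ihh]
      by_cases hca : c = a
      · by_cases hcb : c = b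
        · subst hca; subst hcb
          simp
        · subst hca
          have hcu : c ∉ u := fun hcu =>
            hcb (le_antisymm hab ((List.pairwise_cons.mp hpt).1 c hcu))
          have h0 : u.count c = 0 := List.count_eq_zero.mpr hcu
          simp only [List.count_cons, beq_iff_eq, h0]
          rw [if_neg (fun h => hcb h.symm)]
          simp [hcb]
      · have hca' : ¬ (c = a ∧ c = b) := fun h => hca h.1
        have h1 : (a :: b :: u).count c = (b :: u).count c := List.count_cons_of_ne (fun h => hca h.symm)
        rw [h1]
        simp [hca']

-- A's frequency table looks up the same count that the lowered-list count gives.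
theorem getD_lower_fold (s : String) (ch : Char) :
    ((s.toList.foldl (fun d i => d.insert (PySem.Chars.lowerChar i) (d.getD (PySem.Chars.lowerChar i) 0 + 1)) (PySem.Dict.empty : PySem.Dict Char Int)).getD
        (PySem.Chars.lowerChar ch) 0)
      = ((s.toList.map PySem.Chars.lowerChar).count (PySem.Chars.lowerChar ch) : Int) := by
  rw [← List.foldl_map (f := PySem.Chars.lowerChar)
      (g := fun (d : PySem.Dict Char Int) (x : Char) => d.insert x (d.getD x 0 + 1))
      (l := s.toList) (init := PySem.Dict.empty)]
  rw [PySem.Dict.getD_foldl_insert_add_one]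
  simp

-- ===== VERDICT (by name: the statement is the Claim_ definition above) =====
set_option maxHeartbeats 1000000 in
theorem remove_repeated_characters_spec : Claim_equal_remove_repeated_characters := by
  intro s _
  show remove_repeated_characters s = remove_repeated_characters_alt s
  show String.mk
      (s.toList.foldl (fun acc ch =>
        if (s.toList.foldl (fun d i => d.insert (PySem.Chars.lowerChar i) (d.getD (PySem.Chars.lowerChar i) 0 + 1)) (PySem.Dict.empty : PySem.Dict Char Int)).getD
            (PySem.Chars.lowerChar ch) 0 == (1 : Int) then acc ++ [ch] else acc) [])
    = String.mk (s.toList.filter (fun ch =>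
        !(PySem.Set.contains
          (((PySem.List.sorted (PySem.Str.lower s).toList (fun x => x) false).zip
            (PySem.List.slice (PySem.List.sorted (PySem.Str.lower s).toList (fun x => x) false) (some 1) none)).foldl
            (fun st p => if p.1 == p.2 then PySem.Set.add st p.1 else st) PySem.Set.empty)
          (PySem.Chars.lowerChar ch))))
  rw [PySem.List.foldl_append_if
      (p := fun ch => (s.toList.foldl (fun d i => d.insert (PySem.Chars.lowerChar i) (d.getD (PySem.Chars.lowerChar i) 0 + 1)) (PySem.Dict.empty : PySem.Dict Char Int)).getD
            (PySem.Chars.lowerChar ch) 0 == (1 : Int))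
      (f := fun ch => ch)]
  simp only [List.nil_append, List.map_id', PySem.List.slice_from_one]
  congr 1
  refine List.filter_congr (fun ch hmem => ?_)
  rw [getD_lower_fold]
  set low := PySem.List.sorted (PySem.Str.lower s).toList (fun x => x) false with hlow
  have hperm : low.Perm (s.toList.map PySem.Chars.lowerChar) := by
    rw [hlow]
    have := PySem.List.sorted_perm (xs := (PySem.Str.lower s).toList) (key := fun x => x) (rev := false)
    simpa [PySem.Str.toList_lower, PySem.Chars.lower] using this
  have hsorted : low.Pairwise (· ≤ ·) := by
    have := PySem.List.sorted_pairwise (xs := (PySem.Str.lower s).toList) (key := fun x => x)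
    simpa [hlow] using this
  have hcnt : low.count (PySem.Chars.lowerChar ch) = (s.toList.map PySem.Chars.lowerChar).count (PySem.Chars.lowerChar ch) :=
    hperm.count_eq _
  have hpos : 1 ≤ (s.toList.map PySem.Chars.lowerChar).count (PySem.Chars.lowerChar ch) :=
    List.count_pos_iff.mpr (List.mem_map_of_mem hmem)
  have hdup : (PySem.Set.contains
      ((low.zip low.tail).foldl (fun st p => if p.1 == p.2 then PySem.Set.add st p.1 else st) PySem.Set.empty)
      (PySem.Chars.lowerChar ch)) = true
      ↔ 2 ≤ (s.toList.map PySem.Chars.lowerChar).count (PySem.Chars.lowerChar ch) := by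
    rw [PySem.Set.contains_iff, mem_dup_fold, mem_zip_tail_iff_two_le_count _ low hsorted, hcnt]
    simp [PySem.Set.empty]
  rw [Bool.eq_iff_iff, beq_iff_eq, Bool.not_eq_true', ← Bool.not_eq_true, hdup]
  omega
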